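-- pv_equiv track=rewrite | github.com/eejohnson7/simple-looping-in-python | unit_3/special_order.py | special_order
-- ===== SOURCE A (Python) =====
-- def special_order(inputString):
--     # TODO: Implement function
--     result = ""
--     length = len(inputString)
--     if length % 2 == 0:
--         for i in range(length // 2):
--             result += inputString[length - i - 1]
--     else:
--         for i in range(length // 2 + 1):
--             result += inputString[length - i - 1]
--     for i in range(length // 2):
--         result += inputString[i]
--     return result
-- ===== SOURCE B (Python) =====
-- def special_order(inputString):
--     half = len(inputString) // 2
--     return inputString[half:][::-1] + inputString[:half]
-- ===== Notes on version B (the rewrite author's own statement) =====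
-- stated objective: simpler
-- what changed: Replaces the even/odd branch and the two character-appending index loops with a single closed-form slice expression: reversed second half concatenated with the first half.
import Mathlib
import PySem

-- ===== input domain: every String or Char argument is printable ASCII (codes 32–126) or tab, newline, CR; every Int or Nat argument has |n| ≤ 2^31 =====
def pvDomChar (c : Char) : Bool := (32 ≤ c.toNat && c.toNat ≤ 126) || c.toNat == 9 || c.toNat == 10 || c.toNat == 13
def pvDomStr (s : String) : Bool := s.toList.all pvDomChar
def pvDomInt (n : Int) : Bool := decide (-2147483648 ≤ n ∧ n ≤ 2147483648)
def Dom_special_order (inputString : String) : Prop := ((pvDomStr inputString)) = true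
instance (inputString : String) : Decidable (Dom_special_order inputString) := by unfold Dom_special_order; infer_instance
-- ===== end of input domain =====

-- B replaces A's even/odd branch and two index loops by one closed-form slice expression (simpler).

-- ===== PORT A =====
def special_order (inputString : String) : String :=
  let cs := inputString.toList
  let length : Int := (cs.length : Int)
  let result : List Char := []
  let result :=
    if PySem.Int.mod length 2 = 0 then
      (PySem.List.pyRange 0 (PySem.Int.floordiv length 2) 1).foldl
        (fun r i => r ++ (PySem.List.pyGet? cs (length - i - 1)).toList) result
    else
      (PySem.List.pyRange 0 (PySem.Int.floordiv length 2 + 1) 1).foldl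
        (fun r i => r ++ (PySem.List.pyGet? cs (length - i - 1)).toList) result
  let result :=
    (PySem.List.pyRange 0 (PySem.Int.floordiv length 2) 1).foldl
      (fun r i => r ++ (PySem.List.pyGet? cs i).toList) result
  String.ofList result

-- ===== PORT B =====
def special_order_alt (inputString : String) : String :=
  let cs := inputString.toList
  let half : Int := PySem.Int.floordiv (cs.length : Int) 2
  let revTail := (PySem.List.slice? (PySem.List.slice cs (some half) none) none none (-1)).getD []
  String.ofList (revTail ++ PySem.List.slice cs none (some half))

-- ===== PRECONDITION & SPEC =====
def Spec_special_order (inputString : String) (out : String) : Prop := out = special_order_alt inputString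
instance (inputString : String) (out : String) : Decidable (Spec_special_order inputString out) := by unfold Spec_special_order; infer_instance

-- ===== CLAIM (what is proved, stated in full; the proofs are below) =====
def Claim_equal_special_order : Prop := ∀ (inputString : String), Dom_special_order inputString → Spec_special_order inputString (special_order inputString)

-- ===== LEMMAS AND PROOFS =====

-- First loop of A: appending cs[n-1], …, cs[n-k] builds (cs.drop (n-k)).reverse.
theorem pv_loop_rev (cs : List Char) (k : Nat) (hk : k ≤ cs.length) (r0 : List Char) :
    (PySem.List.pyRange 0 (k : Int) 1).foldl
      (fun r i => r ++ (PySem.List.pyGet? cs ((cs.length : Int) - i - 1)).toList) r0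
    = r0 ++ (cs.drop (cs.length - k)).reverse := by
  induction k generalizing r0 with
  | zero => simp [PySem.List.pyRange_one_eq_nil]
  | succ k ih =>
    have hk' : k ≤ cs.length := Nat.le_of_succ_le hk
    have hcast : ((k + 1 : Nat) : Int) = (k : Int) + 1 := by push_cast; ring
    rw [hcast, PySem.List.pyRange_one_succ_right (by positivity), List.foldl_append, ih hk']
    have hidx : (cs.length : Int) - (k : Int) - 1 = ((cs.length - k - 1 : Nat) : Int) := by
      omega
    have hlt : cs.length - k - 1 < cs.length := by omega
    have hdrop : cs.drop (cs.length - (k + 1)) = cs[cs.length - k - 1] :: cs.drop (cs.length - k) := by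
      have := List.drop_eq_getElem_cons (l := cs) (i := cs.length - k - 1) hlt
      have h1 : cs.length - (k + 1) = cs.length - k - 1 := by omega
      have h2 : cs.length - k - 1 + 1 = cs.length - k := by omega
      rw [h1, this, h2]
    simp [hidx, PySem.List.pyGet?_natCast, List.getElem?_eq_getElem hlt, hdrop]

-- Second loop of A: appending cs[0], …, cs[m-1] builds cs.take m.
theorem pv_loop_take (cs : List Char) (m : Nat) (r0 : List Char) :
    (PySem.List.pyRange 0 (m : Int) 1).foldl
      (fun r i => r ++ (PySem.List.pyGet? cs i).toList) r0
    = r0 ++ cs.take m := by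
  induction m generalizing r0 with
  | zero => simp [PySem.List.pyRange_one_eq_nil]
  | succ m ih =>
    have hcast : ((m + 1 : Nat) : Int) = (m : Int) + 1 := by push_cast; ring
    rw [hcast, PySem.List.pyRange_one_succ_right (by positivity), List.foldl_append, ih]
    simp [PySem.List.pyGet?_natCast, List.take_add_one]

theorem pv_floordiv_two (n : Nat) : PySem.Int.floordiv (n : Int) 2 = ((n / 2 : Nat) : Int) := by
  simp only [PySem.Int.floordiv, Int.fdiv_eq_ediv]
  push_cast
  rfl

theorem pv_mod_two (n : Nat) : PySem.Int.mod (n : Int) 2 = ((n % 2 : Nat) : Int) := by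
  simp only [PySem.Int.mod, Int.fmod_eq_emod]
  push_cast
  rfl

-- ===== VERDICT (by name: the statement is the Claim_ definition above) =====
theorem special_order_spec : Claim_equal_special_order := by
  intro s _
  unfold Spec_special_order special_order special_order_alt
  simp only []
  set cs := s.toList with hcs
  have hfd := pv_floordiv_two cs.length
  rw [hfd]
  rw [PySem.List.slice?_none_none_neg_one, PySem.List.slice_from_natCast,
    PySem.List.slice_to_natCast]
  simp only [Option.getD_some]
  rw [pv_loop_take]
  by_cases hpar : PySem.Int.mod (cs.length : Int) 2 = 0
  · rw [if_pos hpar]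
    have heven : cs.length % 2 = 0 := by
      rw [pv_mod_two] at hpar; exact_mod_cast hpar
    rw [pv_loop_rev cs (cs.length / 2) (Nat.div_le_self _ _)]
    have : cs.length - cs.length / 2 = cs.length / 2 := by omega
    rw [this]
    simp
  · rw [if_neg hpar]
    have hodd : cs.length % 2 = 1 := by
      rw [pv_mod_two] at hpar
      omega
    have hcast : ((cs.length / 2 : Nat) : Int) + 1 = ((cs.length / 2 + 1 : Nat) : Int) := by
      push_cast; ring
    rw [hcast, pv_loop_rev cs (cs.length / 2 + 1) (by omega)]
    have : cs.length - (cs.length / 2 + 1) = cs.length / 2 := by omega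
    rw [this]
    simp
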